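-- pv_equiv track=rewrite | github.com/varioustoxins/NEF-Pipelines | src/nef_pipelines/tools/frames/list.py | _indent_with_prestring
-- ===== SOURCE A (Python) =====
-- def _indent_with_prestring(text_block, pre_string):
--     raw_result = []
--     empty_prestring = " " * len(pre_string)
--     for i, string in enumerate(text_block.split("\n")):
--         if i == 0:
--             raw_result.append(f"{pre_string}{string}")
--         else:
--             raw_result.append(f"{empty_prestring}{string}")
--
--     return "\n".join(raw_result)
-- ===== SOURCE B (Python) =====
-- def _indent_with_prestring(text_block, pre_string):
--     empty_prestring = " " * len(pre_string)
--     return pre_string + text_block.replace("\n", "\n" + empty_prestring)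
-- ===== Notes on version B (the rewrite author's own statement) =====
-- stated objective: idiomatic
-- what changed: Replaces the split/enumerate/branch/join loop with one str.replace that inserts the padding after every newline and a single concatenation of the prefix.
import Mathlib
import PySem

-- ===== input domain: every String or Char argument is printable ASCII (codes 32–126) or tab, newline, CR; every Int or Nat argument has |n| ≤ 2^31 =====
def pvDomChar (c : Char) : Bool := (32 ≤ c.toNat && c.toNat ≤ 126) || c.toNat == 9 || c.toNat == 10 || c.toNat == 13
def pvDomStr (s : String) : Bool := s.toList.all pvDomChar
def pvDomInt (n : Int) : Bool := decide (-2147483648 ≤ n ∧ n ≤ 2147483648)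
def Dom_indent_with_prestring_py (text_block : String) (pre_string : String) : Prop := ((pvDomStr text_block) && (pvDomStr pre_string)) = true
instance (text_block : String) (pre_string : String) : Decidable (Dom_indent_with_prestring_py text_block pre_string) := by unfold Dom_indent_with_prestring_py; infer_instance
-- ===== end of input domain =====

-- B replaces A's split/enumerate/branch/join loop with one string replace that
-- inserts the padding after every newline, plus a single prefix concatenation (idiomatic).


-- ===== PORT A =====
def indent_with_prestring_py (text_block : String) (pre_string : String) : String :=
  let empty_prestring : List Char := List.replicate (PySem.Str.len pre_string).toNat ' '
  let parts : List (List Char) := PySem.Chars.splitOn text_block.toList ['\n']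
  let raw_result : List (List Char) :=
    (PySem.List.enumerate parts).foldl
      (fun acc p =>
        acc ++ [if p.1 == 0 then pre_string.toList ++ p.2 else empty_prestring ++ p.2]) []
  String.ofList (PySem.Chars.join ['\n'] raw_result)

-- ===== PORT B =====
def indent_with_prestring_py_alt (text_block : String) (pre_string : String) : String :=
  let empty_prestring : List Char := List.replicate (PySem.Str.len pre_string).toNat ' '
  String.ofList
    (pre_string.toList ++ PySem.Chars.replace text_block.toList ['\n'] ('\n' :: empty_prestring))

-- ===== PRECONDITION & SPEC =====
def Spec_indent_with_prestring_py (text_block : String) (pre_string : String) (out : String) : Prop := out = indent_with_prestring_py_alt text_block pre_string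
instance (text_block : String) (pre_string : String) (out : String) : Decidable (Spec_indent_with_prestring_py text_block pre_string out) := by unfold Spec_indent_with_prestring_py; infer_instance

-- ===== CLAIM (what is proved, stated in full; the proofs are below) =====
def Claim_equal_indent_with_prestring_py : Prop := ∀ (text_block : String) (pre_string : String), Dom_indent_with_prestring_py text_block pre_string → Spec_indent_with_prestring_py text_block pre_string (indent_with_prestring_py text_block pre_string)

-- ===== LEMMAS AND PROOFS =====

/-- Specification of splitting on a single `'\n'`. -/
def spN : List Char → List (List Char)
  | [] => [[]]
  | c :: t =>
      if c = '\n' then [] :: spN t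
      else
        match spN t with
        | [] => [[c]]
        | h :: r => (c :: h) :: r

/-- Specification of replacing every `'\n'` by `sep`. -/
def repN (sep : List Char) : List Char → List Char
  | [] => []
  | c :: t => if c = '\n' then sep ++ repN sep t else c :: repN sep t

theorem spN_ne_nil (cs : List Char) : spN cs ≠ [] := by
  cases cs with
  | nil => simp [spN]
  | cons c t =>
      simp only [spN]
      split
      · simp
      · split <;> simp_all

theorem splitOn_go_eq (fuel : Nat) :
    ∀ (l cur : List Char) (acc : List (List Char)), l.length ≤ fuel →
      PySem.Chars.splitOn.go ['\n'] fuel l cur acc =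
        acc.reverse ++
          (match spN l with
           | [] => []
           | h :: r => (cur.reverse ++ h) :: r) := by
  induction fuel with
  | zero =>
      intro l cur acc hl
      have : l = [] := by cases l <;> simp_all
      subst this
      simp [PySem.Chars.splitOn.go, spN]
  | succ f ih =>
      intro l cur acc hl
      cases l with
      | nil => simp [PySem.Chars.splitOn.go, spN]
      | cons c rest =>
          by_cases hc : c = '\n'
          · subst hc
            have hpre : List.isPrefixOf ['\n'] ('\n' :: rest) = true := by
              simp [List.isPrefixOf]
            simp only [PySem.Chars.splitOn.go, hpre, if_pos, List.length_cons,
              List.length_nil, List.drop_succ_cons, List.drop_zero]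
            rw [ih rest [] (cur.reverse :: acc) (by simpa using Nat.le_of_succ_le_succ hl)]
            have hne := spN_ne_nil rest
            cases hsp : spN rest with
            | nil => exact absurd hsp hne
            | cons h r => simp [spN, hsp]
          · have hpre : List.isPrefixOf ['\n'] (c :: rest) = false := by
              simp [List.isPrefixOf, Ne.symm hc]
            simp only [PySem.Chars.splitOn.go, hpre]
            rw [if_neg (by simp)]
            rw [ih rest (c :: cur) acc (by simpa using Nat.le_of_succ_le_succ hl)]
            have hne := spN_ne_nil rest
            cases hsp : spN rest with
            | nil => exact absurd hsp hne
            | cons h r => simp [spN, hc, hsp]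

theorem splitOn_eq_spN (cs : List Char) :
    PySem.Chars.splitOn cs ['\n'] = spN cs := by
  unfold PySem.Chars.splitOn
  rw [splitOn_go_eq (cs.length + 1) cs [] [] (Nat.le_succ _)]
  have hne := spN_ne_nil cs
  cases hsp : spN cs with
  | nil => exact absurd hsp hne
  | cons h r => simp

theorem replace_go_eq (sep : List Char) (fuel : Nat) :
    ∀ (l acc : List Char), l.length ≤ fuel →
      PySem.Chars.replace.go ['\n'] sep fuel l acc = acc.reverse ++ repN sep l := by
  induction fuel with
  | zero =>
      intro l acc hl
      have : l = [] := by cases l <;> simp_all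
      subst this
      simp [PySem.Chars.replace.go, repN]
  | succ f ih =>
      intro l acc hl
      cases l with
      | nil => simp [PySem.Chars.replace.go, repN]
      | cons c rest =>
          by_cases hc : c = '\n'
          · subst hc
            have hpre : List.isPrefixOf ['\n'] ('\n' :: rest) = true := by
              simp [List.isPrefixOf]
            simp only [PySem.Chars.replace.go, hpre, if_pos, List.length_cons,
              List.length_nil, List.drop_succ_cons, List.drop_zero]
            rw [ih rest (sep.reverse ++ acc) (by simpa using Nat.le_of_succ_le_succ hl)]
            simp [repN]
          · have hpre : List.isPrefixOf ['\n'] (c :: rest) = false := by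
              simp [List.isPrefixOf, Ne.symm hc]
            simp only [PySem.Chars.replace.go, hpre]
            rw [if_neg (by simp)]
            rw [ih rest (c :: acc) (by simpa using Nat.le_of_succ_le_succ hl)]
            simp [repN, hc]

theorem replace_eq_repN (cs sep : List Char) :
    PySem.Chars.replace cs ['\n'] sep = repN sep cs := by
  unfold PySem.Chars.replace
  rw [if_neg (by simp)]
  simpa using replace_go_eq sep cs.length cs [] le_rfl

theorem join_flat (sep : List Char) :
    ∀ (ps : List (List Char)) (a : List Char),
      PySem.Chars.join sep (a :: ps) = a ++ ps.flatMap (fun p => sep ++ p) := by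
  intro ps
  induction ps with
  | nil => intro a; simp [PySem.Chars.join_singleton]
  | cons b t ih =>
      intro a
      rw [PySem.Chars.join_cons_cons, ih b]
      simp

theorem repN_flat (sep : List Char) (cs : List Char) :
    repN sep cs =
      (match spN cs with
       | [] => []
       | h :: r => h ++ r.flatMap (fun p => sep ++ p)) := by
  induction cs with
  | nil => simp [repN, spN]
  | cons c t ih =>
      by_cases hc : c = '\n'
      · subst hc
        have hne := spN_ne_nil t
        cases hsp : spN t with
        | nil => exact absurd hsp hne
        | cons h r =>
            simp only [repN, spN, if_pos]
            rw [ih]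
            simp [hsp]
      · have hne := spN_ne_nil t
        cases hsp : spN t with
        | nil => exact absurd hsp hne
        | cons h r =>
            simp only [repN, spN, if_neg hc]
            rw [ih]
            simp [hsp]

theorem enum_fold (pre pad : List Char) :
    ∀ (t : List (List Char)) (n : Int), 1 ≤ n → ∀ (acc : List (List Char)),
      (PySem.List.enumerate t n).foldl
          (fun acc p =>
            acc ++ [if p.1 == 0 then pre ++ p.2 else pad ++ p.2]) acc =
        acc ++ t.map (fun p => pad ++ p) := by
  intro t
  induction t with
  | nil => intro n _ acc; simp [PySem.List.enumerate]
  | cons h r ih =>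
      intro n hn acc
      have hne : (n == 0) = false := by
        rw [beq_eq_false_iff_ne]
        omega
      simp only [PySem.List.enumerate, List.foldl, hne, Bool.false_eq_true]
      rw [ih (n + 1) (by omega)]
      rw [List.append_assoc]
      rfl

theorem indent_lists_eq (text_block pre_string : String) :
    indent_with_prestring_py text_block pre_string =
      indent_with_prestring_py_alt text_block pre_string := by
  unfold indent_with_prestring_py indent_with_prestring_py_alt
  set pad : List Char := List.replicate (PySem.Str.len pre_string).toNat ' ' with hpad
  simp only [splitOn_eq_spN, replace_eq_repN]
  congr 1
  have hne := spN_ne_nil text_block.toList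
  cases hsp : spN text_block.toList with
  | nil => exact absurd hsp hne
  | cons h r =>
      have hfold :
          (PySem.List.enumerate (h :: r) 0).foldl
              (fun acc p =>
                acc ++ [if p.1 == 0 then pre_string.toList ++ p.2 else pad ++ p.2]) [] =
            (pre_string.toList ++ h) :: r.map (fun p => pad ++ p) := by
        simp only [PySem.List.enumerate, List.foldl]
        rw [enum_fold pre_string.toList pad r (0 + 1) (by omega)]
        simp
      rw [hfold, join_flat, repN_flat, hsp]
      rw [List.flatMap_map]
      simp

-- ===== VERDICT (by name: the statement is the Claim_ definition above) =====
theorem indent_with_prestring_py_spec : Claim_equal_indent_with_prestring_py := by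
  intro text_block pre_string _
  exact indent_lists_eq text_block pre_string
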